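-- pv_equiv track=rewrite | github.com/Matteo-Candi/Master-Thesis | results/test_01/test_01_formatted.py | maximumOccurrence
-- ===== SOURCE A (Python) =====
-- def maximumOccurrence(s):
--     n = len(s)
--     freq = {}
--     i, j = 0, 0
--     for i in range(n):
--         temp = s[i]
--         freq[temp] = freq.get(temp, 0) + 1
--     for i in range(n):
--         for j in range(i+1, n):
--             temp = s[i] + s[j]
--             freq[temp] = freq.get(temp, 0) + 1
--     answer = float('-inf')
--     for entry in freq.items():
--         answer = max(answer, entry[1])
--     return answer
-- ===== SOURCE B (Python) =====
-- def maximumOccurrence(s):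
--     seen = {}
--     pairs = {}
--     for c in s:
--         for a, k in seen.items():
--             pairs[(a, c)] = pairs.get((a, c), 0) + k
--         seen[c] = seen.get(c, 0) + 1
--     return max(max(seen.values()), max(pairs.values(), default=0))
-- ===== Notes on version B (the rewrite author's own statement) =====
-- stated objective: faster
-- what changed: replaces A's O(n^2) double loop over index pairs by a single left-to-right pass that, at each character, folds the running per-character counts (a Counter of the prefix) into a pair counter, then takes the max of both counters' values
-- outside the precondition, e.g. on maximumOccurrence(''): A returns -inf, B raises ValueError
import Mathlib
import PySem

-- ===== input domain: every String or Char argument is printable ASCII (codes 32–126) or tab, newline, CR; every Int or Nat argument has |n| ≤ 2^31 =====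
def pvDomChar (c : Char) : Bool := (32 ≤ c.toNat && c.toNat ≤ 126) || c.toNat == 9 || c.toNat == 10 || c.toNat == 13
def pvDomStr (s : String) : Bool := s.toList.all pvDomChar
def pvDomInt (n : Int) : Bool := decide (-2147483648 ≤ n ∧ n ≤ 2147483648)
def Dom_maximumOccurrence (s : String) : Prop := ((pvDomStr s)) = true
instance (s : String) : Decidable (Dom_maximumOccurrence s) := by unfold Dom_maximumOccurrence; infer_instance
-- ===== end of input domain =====

-- B replaces A's quadratic double loop over index pairs by one pass that folds the
-- running per-character counts into a pair counter (faster; measured by the check).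
-- Strings are modelled as List Char (PySem convention); dict keys s[i] and s[i]+s[j]
-- become the lists [c] and [a,b].

-- ===== PORT A =====
-- 'for i in range(n): for j in range(i+1, n): freq[s[i]+s[j]] += 1' over the tail list
def pvPairLoop : List Char → PySem.Dict (List Char) Int → PySem.Dict (List Char) Int
  | [], d => d
  | x :: rest, d => pvPairLoop rest (rest.foldl (fun d y => d.modify [x, y] 0 (· + 1)) d)

def maximumOccurrence (s : String) : Int :=
  let cs := s.toList
  -- first loop: freq[s[i]] = freq.get(s[i], 0) + 1
  let freq1 := cs.foldl (fun d c => d.modify [c] 0 (· + 1)) (PySem.Dict.empty : PySem.Dict (List Char) Int)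
  -- nested loop over pairs i < j
  let freq := pvPairLoop cs freq1
  -- answer = -infinity; for entry in freq.items(): answer = max(answer, entry[1])
  match freq.items with
  | [] => 0  -- Python: answer stays minus-infinity float (not an int); excluded by Pre_
  | e :: rest => rest.foldl (fun a p => max a p.2) e.2

-- ===== PORT B =====
def maximumOccurrence_alt (s : String) : Int :=
  let st := s.toList.foldl
    (fun (st : PySem.Dict Char Int × PySem.Dict (Char × Char) Int) c =>
      -- for a, k in seen.items(): pairs[(a, c)] = pairs.get((a, c), 0) + k
      let pairs := st.1.items.foldl (fun pr ak => pr.modify (ak.1, c) 0 (· + ak.2)) st.2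
      -- seen[c] = seen.get(c, 0) + 1
      let seen := st.1.modify c 0 (· + 1)
      (seen, pairs))
    (PySem.Dict.empty, PySem.Dict.empty)
  let m1 := match st.1.values with
    | [] => 0  -- Python: max() raises ValueError; excluded by Pre_
    | v :: t => t.foldl max v
  let m2 := PySem.List.maxD st.2.values (fun x => x) 0
  max m1 m2

-- ===== PRECONDITION & SPEC =====
-- Pre_ excludes only the empty string, on which A returns a minus-infinity float —
-- not a value of the declared int type (B raises ValueError there).
def Pre_maximumOccurrence (s : String) : Prop := s.toList ≠ []
instance (s : String) : Decidable (Pre_maximumOccurrence s) := by unfold Pre_maximumOccurrence; infer_instance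
def pvWitness_maximumOccurrence : String := "abca"

def Spec_maximumOccurrence (s : String) (out : Int) : Prop := out = maximumOccurrence_alt s
instance (s : String) (out : Int) : Decidable (Spec_maximumOccurrence s out) := by unfold Spec_maximumOccurrence; infer_instance

-- ===== CLAIM (what is proved, stated in full; the proofs are below) =====
def Claim_equal_maximumOccurrence : Prop := ∀ (s : String), Dom_maximumOccurrence s → Pre_maximumOccurrence s → Spec_maximumOccurrence s (maximumOccurrence s)

-- ===== LEMMAS AND PROOFS =====

def pairsOf : List Char → List (Char × Char)
  | [] => []
  | x :: t => t.map (fun y => (x, y)) ++ pairsOf t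
def keysA (cs : List Char) : List (List Char) :=
  cs.map (fun c => [c]) ++ (pairsOf cs).map (fun p => [p.1, p.2])


lemma pvPairLoop_eq (cs : List Char) (d : PySem.Dict (List Char) Int) :
    pvPairLoop cs d =
      ((pairsOf cs).map (fun p => [p.1, p.2])).foldl (fun d k => d.modify k 0 (· + 1)) d := by
  induction cs generalizing d with
  | nil => simp [pvPairLoop, pairsOf]
  | cons x t ih =>
    simp only [pvPairLoop, pairsOf, List.map_append, List.foldl_append, ih, List.map_map, List.foldl_map]
    rfl

lemma freq_eq_counter (cs : List Char) :
    ((pairsOf cs).map (fun p => [p.1, p.2])).foldl (fun d k => d.modify k 0 (· + 1))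
      (cs.foldl (fun d c => d.modify [c] 0 (· + 1)) PySem.Dict.empty)
      = PySem.Dict.counter (keysA cs) := by
  simp only [PySem.Dict.counter_eq_foldl, keysA, List.foldl_append, List.foldl_map]

lemma count_keysA_single (cs : List Char) (c : Char) :
    (keysA cs).count [c] = cs.count c := by
  rw [keysA, List.count_append]
  have h1 : (cs.map (fun c => [c])).count [c] = cs.count c :=
    List.count_map_of_injective cs (fun c => [c]) (fun x y h => by simpa using h) c
  have h2 : ((pairsOf cs).map (fun p => [p.1, p.2])).count [c] = 0 := by
    refine List.count_eq_zero.mpr fun hm => ?_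
    obtain ⟨x, _, hx⟩ := List.mem_map.mp hm
    exact absurd (congrArg List.length hx) (by simp)
  omega

lemma count_keysA_pair (cs : List Char) (q : Char × Char) :
    (keysA cs).count [q.1, q.2] = (pairsOf cs).count q := by
  rw [keysA, List.count_append]
  have h1 : (cs.map (fun c => [c])).count [q.1, q.2] = 0 := by
    refine List.count_eq_zero.mpr fun hm => ?_
    obtain ⟨x, _, hx⟩ := List.mem_map.mp hm
    exact absurd (congrArg List.length hx) (by simp)
  have h2 : ((pairsOf cs).map (fun p => [p.1, p.2])).count [q.1, q.2] = (pairsOf cs).count q :=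
    List.count_map_of_injective _ (fun p : Char × Char => [p.1, p.2])
      (fun x y h => by
        have h1 := congrArg (fun l : List Char => l[0]!) h
        have h2 := congrArg (fun l : List Char => l[1]!) h
        simp at h1 h2
        exact Prod.ext h1 h2) q
  omega

lemma mem_keysA (cs : List Char) (k : List Char) :
    k ∈ keysA cs ↔ (∃ c ∈ cs, k = [c]) ∨ (∃ q ∈ pairsOf cs, k = [q.1, q.2]) := by
  simp only [keysA, List.mem_append, List.mem_map]
  constructor
  · rintro (⟨c, hc, rfl⟩ | ⟨q, hq, rfl⟩)
    · exact Or.inl ⟨c, hc, rfl⟩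
    · exact Or.inr ⟨q, hq, rfl⟩
  · rintro (⟨c, hc, rfl⟩ | ⟨q, hq, rfl⟩)
    · exact Or.inl ⟨c, hc, rfl⟩
    · exact Or.inr ⟨q, hq, rfl⟩

lemma foldl_modify_pairs (L : List (Char × Int)) (c : Char)
    (pr : PySem.Dict (Char × Char) Int) (q : Char × Char) :
    (L.foldl (fun pr ak => pr.modify (ak.1, c) 0 (· + ak.2)) pr).getD q 0 =
      pr.getD q 0 + (if q.2 = c then ((L.filter (fun ak => ak.1 == q.1)).map (·.2)).sum else 0) := by
  induction L generalizing pr with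
  | nil => simp
  | cons ak t ih =>
    simp only [List.foldl_cons, ih, List.filter_cons]
    rw [PySem.Dict.getD_modify]
    rcases q with ⟨a, b⟩
    by_cases hb : b = c
    · by_cases ha : ak.1 = a
      · simp [ha, hb]; ring
      · simp only [Prod.ext_iff] at *
        simp [ha, hb]
        intro h
        exact absurd h.symm ha
    · simp [hb, Prod.ext_iff]

lemma sum_filter_counter (p : List Char) (a : Char) :
    ((((PySem.Dict.counter p).items.filter (fun ak => ak.1 == a)).map (·.2)).sum : Int)
      = (p.count a : Int) := by
  rw [PySem.Dict.items_counter, List.filter_map]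
  have hc : ((fun ak : Char × Int => ak.1 == a) ∘ fun k => (k, (p.count k : Int)))
      = fun x => x == a := by
    funext k; simp
  rw [hc, List.filter_beq, List.map_map]
  by_cases h : a ∈ p
  · rw [List.count_eq_one_of_mem (PySem.Set.nodup_ofList p) ((PySem.Set.mem_ofList p a).mpr h)]
    simp
  · rw [List.count_eq_zero.mpr (fun hm => h ((PySem.Set.mem_ofList p a).mp hm))]
    simp [List.count_eq_zero.mpr h]

lemma pairsOf_append_singleton (p : List Char) (c : Char) :
    (pairsOf (p ++ [c])).Perm (pairsOf p ++ p.map (fun a => (a, c))) := by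
  induction p with
  | nil => simp [pairsOf]
  | cons x t ih =>
    refine List.perm_iff_count.mpr fun q => ?_
    have h := List.perm_iff_count.mp ih q
    simp only [List.cons_append, pairsOf, List.map_append, List.map_cons, List.map_nil,
      List.count_append, List.count_cons, List.count_nil] at *
    split_ifs <;> omega

lemma count_map_pair (p : List Char) (c : Char) (q : Char × Char) :
    (p.map (fun a => (a, c))).count q = if q.2 = c then p.count q.1 else 0 := by
  rcases q with ⟨a, b⟩
  by_cases h : b = c
  · subst h
    simpa using List.count_map_of_injective p (fun a => (a, b)) (fun x y hxy => by simpa using hxy) a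
  · rw [if_neg h]
    refine List.count_eq_zero.mpr fun hm => ?_
    obtain ⟨x, _, hx⟩ := List.mem_map.mp hm
    exact h (by simpa using congrArg Prod.snd hx.symm)

lemma B_fold_inv (l : List Char) : ∀ (p : List Char) (pr : PySem.Dict (Char × Char) Int),
    (∀ q : Char × Char, pr.getD q 0 = ((pairsOf p).count q : Int)) →
    (∀ q : Char × Char, q ∈ pr.keys ↔ q ∈ pairsOf p) →
    pr.keys.Nodup →
    (l.foldl
      (fun (st : PySem.Dict Char Int × PySem.Dict (Char × Char) Int) c =>
        let pairs := st.1.items.foldl (fun pr ak => pr.modify (ak.1, c) 0 (· + ak.2)) st.2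
        let seen := st.1.modify c 0 (· + 1)
        (seen, pairs))
      (PySem.Dict.counter p, pr)) =
      (PySem.Dict.counter (p ++ l),
        (l.foldl
          (fun (st : PySem.Dict Char Int × PySem.Dict (Char × Char) Int) c =>
            let pairs := st.1.items.foldl (fun pr ak => pr.modify (ak.1, c) 0 (· + ak.2)) st.2
            let seen := st.1.modify c 0 (· + 1)
            (seen, pairs))
          (PySem.Dict.counter p, pr)).2) ∧
    (∀ q : Char × Char,
      (l.foldl
        (fun (st : PySem.Dict Char Int × PySem.Dict (Char × Char) Int) c =>
          let pairs := st.1.items.foldl (fun pr ak => pr.modify (ak.1, c) 0 (· + ak.2)) st.2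
          let seen := st.1.modify c 0 (· + 1)
          (seen, pairs))
        (PySem.Dict.counter p, pr)).2.getD q 0 = ((pairsOf (p ++ l)).count q : Int)) ∧
    (∀ q : Char × Char,
      q ∈ (l.foldl
        (fun (st : PySem.Dict Char Int × PySem.Dict (Char × Char) Int) c =>
          let pairs := st.1.items.foldl (fun pr ak => pr.modify (ak.1, c) 0 (· + ak.2)) st.2
          let seen := st.1.modify c 0 (· + 1)
          (seen, pairs))
        (PySem.Dict.counter p, pr)).2.keys ↔ q ∈ pairsOf (p ++ l)) ∧
    (l.foldl
      (fun (st : PySem.Dict Char Int × PySem.Dict (Char × Char) Int) c =>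
        let pairs := st.1.items.foldl (fun pr ak => pr.modify (ak.1, c) 0 (· + ak.2)) st.2
        let seen := st.1.modify c 0 (· + 1)
        (seen, pairs))
      (PySem.Dict.counter p, pr)).2.keys.Nodup := by
  induction l with
  | nil =>
    intro p pr h1 h2 h3
    exact ⟨by simp, by simpa using h1, by simpa using h2, h3⟩
  | cons c t ih =>
    intro p pr h1 h2 h3
    simp only [List.foldl_cons]
    have hseen : (PySem.Dict.counter p).modify c 0 (· + 1) = PySem.Dict.counter (p ++ [c]) :=
      (PySem.Dict.counter_append_singleton p c).symm
    set pr' := (PySem.Dict.counter p).items.foldl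
        (fun pr ak => pr.modify (ak.1, c) 0 (· + ak.2)) pr with hpr'
    have hperm := pairsOf_append_singleton p c
    -- getD invariant for pr'
    have h1' : ∀ q : Char × Char, pr'.getD q 0 = ((pairsOf (p ++ [c])).count q : Int) := by
      intro q
      rw [hpr', foldl_modify_pairs, h1, hperm.count_eq, List.count_append, count_map_pair]
      by_cases hq : q.2 = c
      · rw [if_pos hq, if_pos hq, sum_filter_counter]
        push_cast; ring
      · simp [hq]
    -- keys membership
    have h2' : ∀ q : Char × Char, q ∈ pr'.keys ↔ q ∈ pairsOf (p ++ [c]) := by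
      intro q
      rw [hpr', PySem.Dict.keys_foldl_modify_key _ (fun ak : Char × Int => (ak.1, c)) 0
        (fun _ ak v => v + ak.2) pr]
      rw [PySem.Set.mem_update]
      rw [hperm.mem_iff, List.mem_append, h2]
      constructor
      · rintro (h | h)
        · exact Or.inl h
        · obtain ⟨ak, hak, rfl⟩ := List.mem_map.mp h
          refine Or.inr (List.mem_map.mpr ⟨ak.1, ?_, rfl⟩)
          have : ak.1 ∈ (PySem.Dict.counter p).keys :=
            PySem.Dict.mem_keys_of_mem_items _ hak
          rw [PySem.Dict.keys_counter] at this
          exact (PySem.Set.mem_ofList p ak.1).mp this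
      · rintro (h | h)
        · exact Or.inl h
        · obtain ⟨a, ha, rfl⟩ := List.mem_map.mp h
          refine Or.inr (List.mem_map.mpr ?_)
          have : a ∈ (PySem.Dict.counter p).keys := by
            rw [PySem.Dict.keys_counter]; exact (PySem.Set.mem_ofList p a).mpr ha
          have hcont : (PySem.Dict.counter p).contains a = true :=
            (PySem.Dict.contains_iff_mem_keys _ a).mpr this
          rw [PySem.Dict.contains_eq_isSome_get?] at hcont
          obtain ⟨v, hv⟩ := Option.isSome_iff_exists.mp hcont
          exact ⟨(a, v), PySem.Dict.mem_items_of_get?_eq_some _ hv, rfl⟩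
    have h3' : pr'.keys.Nodup := by
      rw [hpr']
      exact PySem.Dict.nodup_keys_foldl_modify_key _ (fun ak : Char × Int => (ak.1, c)) 0
        (fun _ ak v => v + ak.2) pr h3
    have := ih (p ++ [c]) pr' h1' h2' h3'
    rw [hseen]
    simpa [List.append_assoc] using this


lemma max_foldl_info (v : Int) (t : List Int) :
    v ≤ t.foldl max v ∧ (∀ x ∈ t, x ≤ t.foldl max v) ∧ (t.foldl max v = v ∨ t.foldl max v ∈ t) :=
  ⟨(PySem.List.le_foldl_max t v).1, (PySem.List.le_foldl_max t v).2, PySem.List.foldl_max_mem t v⟩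

lemma mem_map_snd_counter_keysA (cs : List Char) (e : (List Char) × Int)
    (rest : List ((List Char) × Int))
    (hK : (PySem.Set.ofList (keysA cs)).map (fun k => (k, ((keysA cs).count k : Int)))
            = e :: rest) (x : Int) :
    x ∈ (e :: rest).map (·.2) ↔
      ((∃ c ∈ cs, x = (cs.count c : Int)) ∨
       (∃ q ∈ pairsOf cs, x = ((pairsOf cs).count q : Int))) := by
  rw [← hK, List.map_map]
  simp only [List.mem_map, Function.comp]
  constructor
  · rintro ⟨k, hk, rfl⟩
    rcases (mem_keysA cs k).mp ((PySem.Set.mem_ofList _ k).mp hk) with ⟨c, hc, rfl⟩ | ⟨q, hq, rfl⟩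
    · exact Or.inl ⟨c, hc, by rw [count_keysA_single]⟩
    · exact Or.inr ⟨q, hq, by rw [count_keysA_pair]⟩
  · rintro (⟨c, hc, rfl⟩ | ⟨q, hq, rfl⟩)
    · refine ⟨[c], (PySem.Set.mem_ofList _ _).mpr ((mem_keysA cs [c]).mpr (Or.inl ⟨c, hc, rfl⟩)), ?_⟩
      rw [count_keysA_single]
    · refine ⟨[q.1, q.2], (PySem.Set.mem_ofList _ _).mpr
        ((mem_keysA cs [q.1, q.2]).mpr (Or.inr ⟨q, hq, rfl⟩)), ?_⟩
      rw [count_keysA_pair]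

-- ===== VERDICT (by name: the statement is the Claim_ definition above) =====
theorem maximumOccurrence_spec : Claim_equal_maximumOccurrence := by
  intro s _ hpre
  unfold Pre_maximumOccurrence at hpre
  unfold Spec_maximumOccurrence
  obtain ⟨c0, cs', hcs0⟩ := List.exists_cons_of_ne_nil hpre
  set cs := s.toList with hcs
  -- A side: the dict is the counter of keysA cs
  have hfreq : pvPairLoop cs (cs.foldl (fun d c => d.modify [c] 0 (· + 1)) PySem.Dict.empty)
      = PySem.Dict.counter (keysA cs) := by
    rw [pvPairLoop_eq]; exact freq_eq_counter cs
  have hit : (PySem.Dict.counter (keysA cs)).items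
      = (PySem.Set.ofList (keysA cs)).map (fun k => (k, ((keysA cs).count k : Int))) :=
    PySem.Dict.items_counter _
  have hkey0 : [c0] ∈ PySem.Set.ofList (keysA cs) :=
    (PySem.Set.mem_ofList _ _).mpr ((mem_keysA cs [c0]).mpr (Or.inl ⟨c0, by rw [hcs0]; exact List.mem_cons_self, rfl⟩))
  rcases hK : (PySem.Set.ofList (keysA cs)).map (fun k => (k, ((keysA cs).count k : Int))) with _ | ⟨e, rest⟩
  · rw [hK] at hit
    exact absurd hit (by
      intro h
      have : [c0] ∈ ([] : List ((List Char) × Int)).map (·.1) := by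
        rw [← hK, List.map_map]
        exact List.mem_map.mpr ⟨[c0], hkey0, rfl⟩
      simp at this)
  -- B side invariant
  obtain ⟨hB1, hB2, hB3, hB4⟩ := B_fold_inv cs [] PySem.Dict.empty
    (by intro q; simp [pairsOf]) (by intro q; simp [pairsOf]) (by simp)
  simp only [List.nil_append] at hB1 hB2 hB3 hB4
  unfold maximumOccurrence maximumOccurrence_alt
  simp only [← hcs, hfreq, hit, hK]
  set st := cs.foldl
      (fun (st : PySem.Dict Char Int × PySem.Dict (Char × Char) Int) c =>
        let pairs := st.1.items.foldl (fun pr ak => pr.modify (ak.1, c) 0 (· + ak.2)) st.2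
        let seen := st.1.modify c 0 (· + 1)
        (seen, pairs)) (PySem.Dict.empty, PySem.Dict.empty) with hst
  have hst1 : st.1 = PySem.Dict.counter cs := congrArg Prod.fst hB1
  have hB2' : ∀ q : Char × Char, st.2.getD q 0 = ((pairsOf cs).count q : Int) := hB2
  have hB3' : ∀ q : Char × Char, q ∈ st.2.keys ↔ q ∈ pairsOf cs := hB3
  have hB4' : st.2.keys.Nodup := hB4
  -- seen.values
  have hsv : st.1.values = (PySem.Set.ofList cs).map (fun c => (cs.count c : Int)) := by
    rw [hst1, PySem.Dict.values_eq_map_keys _ (PySem.Dict.nodup_keys_counter cs) 0,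
      PySem.Dict.keys_counter]
    exact List.map_congr_left fun k _ => PySem.Dict.getD_counter cs k
  have hsv_mem : ∀ x : Int, x ∈ st.1.values ↔ ∃ c ∈ cs, x = (cs.count c : Int) := by
    intro x
    rw [hsv]
    simp only [List.mem_map]
    constructor
    · rintro ⟨c, hc, rfl⟩; exact ⟨c, (PySem.Set.mem_ofList _ _).mp hc, rfl⟩
    · rintro ⟨c, hc, rfl⟩; exact ⟨c, (PySem.Set.mem_ofList _ _).mpr hc, rfl⟩
  -- pairs.values
  have hpv_mem : ∀ x : Int, x ∈ st.2.values ↔ ∃ q ∈ pairsOf cs, x = ((pairsOf cs).count q : Int) := by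
    intro x
    rw [PySem.Dict.values_eq_map_keys _ hB4' 0]
    simp only [List.mem_map]
    constructor
    · rintro ⟨q, hq, rfl⟩; exact ⟨q, (hB3' q).mp hq, by rw [hB2' q]⟩
    · rintro ⟨q, hq, rfl⟩; exact ⟨q, (hB3' q).mpr hq, by rw [hB2' q]⟩
  -- seen.values nonempty
  rcases hv : st.1.values with _ | ⟨v, tl⟩
  · exfalso
    have : (cs.count c0 : Int) ∈ st.1.values :=
      (hsv_mem _).mpr ⟨c0, by rw [hcs0]; exact List.mem_cons_self, rfl⟩
    rw [hv] at this; simp at this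
  -- the two maxima
  simp only []
  have hfm : List.foldl (fun a (p : (List Char) × Int) => max a p.2) e.2 rest
      = (rest.map (·.2)).foldl max e.2 := (List.foldl_map).symm
  rw [hfm]
  have hAinfo := max_foldl_info e.2 (rest.map (·.2))
  have hBinfo := max_foldl_info v tl
  set ansA := (rest.map (·.2)).foldl max e.2 with hansA
  set m1 := tl.foldl max v with hm1
  have hVA := mem_map_snd_counter_keysA cs e rest hK
  have hA_mem : ansA ∈ (e :: rest).map (·.2) := by
    rw [List.map_cons]
    rcases hAinfo.2.2 with h | h
    · rw [h]; exact List.mem_cons_self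
    · exact List.mem_cons_of_mem _ h
  have hA_ub : ∀ x ∈ (e :: rest).map (·.2), x ≤ ansA := by
    intro x hx
    rw [List.map_cons] at hx
    rcases List.mem_cons.mp hx with h | h
    · rw [h]; exact hAinfo.1
    · exact hAinfo.2.1 x h
  have hm1_mem : m1 ∈ st.1.values := by
    rw [hv]
    rcases hBinfo.2.2 with h | h
    · rw [h]; exact List.mem_cons_self
    · exact List.mem_cons_of_mem _ h
  have hm1_ub : ∀ x ∈ st.1.values, x ≤ m1 := by
    intro x hx
    rw [hv] at hx
    rcases List.mem_cons.mp hx with h | h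
    · rw [h]; exact hBinfo.1
    · exact hBinfo.2.1 x h
  -- m2
  rw [PySem.List.maxD]
  rcases hmx : PySem.List.max? st.2.values (fun x => x) with _ | m
  · -- pairs empty
    have hempty : st.2.values = [] := (PySem.List.max?_eq_none_iff _ _).mp hmx
    simp only [Option.getD_none]
    apply le_antisymm
    · rcases (hVA ansA).mp hA_mem with ⟨c, hc, hx⟩ | ⟨q, hq, hx⟩
      · exact le_max_of_le_left (by rw [hx]; exact hm1_ub _ ((hsv_mem _).mpr ⟨c, hc, rfl⟩))
      · exfalso
        have : ((pairsOf cs).count q : Int) ∈ st.2.values := (hpv_mem _).mpr ⟨q, hq, rfl⟩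
        rw [hempty] at this; simp at this
    · apply max_le
      · rcases (hsv_mem m1).mp hm1_mem with ⟨c, hc, hx⟩
        exact hx ▸ hA_ub _ ((hVA _).mpr (Or.inl ⟨c, hc, rfl⟩))
      · calc (0 : Int) ≤ (cs.count c0 : Int) := Int.natCast_nonneg _
          _ ≤ ansA := hA_ub _ ((hVA _).mpr (Or.inl ⟨c0, by rw [hcs0]; exact List.mem_cons_self, rfl⟩))
  · have hm2_mem : m ∈ st.2.values := PySem.List.max?_mem hmx
    have hm2_ub : ∀ y ∈ st.2.values, y ≤ m := PySem.List.max?_isMax hmx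
    simp only [Option.getD_some]
    apply le_antisymm
    · rcases (hVA ansA).mp hA_mem with ⟨c, hc, hx⟩ | ⟨q, hq, hx⟩
      · exact le_max_of_le_left (by rw [hx]; exact hm1_ub _ ((hsv_mem _).mpr ⟨c, hc, rfl⟩))
      · exact le_max_of_le_right (by rw [hx]; exact hm2_ub _ ((hpv_mem _).mpr ⟨q, hq, rfl⟩))
    · apply max_le
      · rcases (hsv_mem m1).mp hm1_mem with ⟨c, hc, hx⟩
        exact hx ▸ hA_ub _ ((hVA _).mpr (Or.inl ⟨c, hc, rfl⟩))
      · rcases (hpv_mem m).mp hm2_mem with ⟨q, hq, hx⟩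
        exact hx ▸ hA_ub _ ((hVA _).mpr (Or.inr ⟨q, hq, rfl⟩))
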